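-- pv_equiv track=rewrite | github.com/1kapsula/system_analysis | task5/task.py | process_matrices
-- ===== SOURCE A (Python) =====
-- def process_matrices(matrix_a, matrix_b, transpose=False):
--     size = len(matrix_a)
--     result_matrix = [[0] * size for _ in range(size)]
--
--     if transpose:
--         matrix_a = [[matrix_a[j][i] for j in range(size)] for i in range(size)]
--         matrix_b = [[matrix_b[j][i] for j in range(size)] for i in range(size)]
--
--     for i in range(size):
--         for j in range(size):
--             result_matrix[i][j] = matrix_a[i][j] * matrix_b[i][j]
--     return result_matrix
-- ===== SOURCE B (Python) =====
-- def process_matrices(matrix_a, matrix_b, transpose=False):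
--     n = len(matrix_a)
--     flat = [0] * (n * n)
--     for k in range(n * n):
--         i, j = divmod(k, n)
--         flat[j * n + i if transpose else k] = matrix_a[i][j] * matrix_b[i][j]
--     return [flat[r * n:(r + 1) * n] for r in range(n)]
-- ===== Notes on version B (the rewrite author's own statement) =====
-- stated objective: alternative
-- what changed: B fills one flat length-n*n buffer in a single loop over k in range(n*n), decoding (i,j)=divmod(k,n) and scattering the product to position j*n+i when transpose is requested (no input transposition, no nested loops, no 2-D preallocation), then reshapes the buffer into rows by slicing; Pre_ excludes ragged/too-short inputs on which A raises IndexError.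
import Mathlib
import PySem

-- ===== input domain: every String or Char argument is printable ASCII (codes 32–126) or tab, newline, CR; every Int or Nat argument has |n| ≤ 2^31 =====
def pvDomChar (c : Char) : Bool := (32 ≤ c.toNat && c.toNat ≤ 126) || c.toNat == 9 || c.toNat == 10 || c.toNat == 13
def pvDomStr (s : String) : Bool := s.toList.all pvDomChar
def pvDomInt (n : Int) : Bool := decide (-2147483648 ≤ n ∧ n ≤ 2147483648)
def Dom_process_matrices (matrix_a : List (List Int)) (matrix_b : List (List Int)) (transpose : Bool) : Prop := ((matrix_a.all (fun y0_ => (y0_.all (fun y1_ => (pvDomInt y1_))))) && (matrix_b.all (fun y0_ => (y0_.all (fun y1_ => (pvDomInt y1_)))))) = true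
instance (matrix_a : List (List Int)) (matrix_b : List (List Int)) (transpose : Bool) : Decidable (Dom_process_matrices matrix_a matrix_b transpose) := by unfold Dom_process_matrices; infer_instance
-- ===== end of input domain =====

-- B fills one flat n*n buffer in a single scatter loop (divmod-decoded indices, transposed write
-- position when asked) and reshapes it into rows by slicing (objective: alternative; return value only).

-- ===== PORT A =====
-- Python m[i][j] (totalized with defaults; exact on in-range indices, which Pre_ guarantees)
def pvIdxA (m : List (List Int)) (i j : Int) : Int :=
  PySem.List.pyGetD (PySem.List.pyGetD m i []) j 0

def process_matrices (matrix_a : List (List Int)) (matrix_b : List (List Int)) (transpose : Bool) : List (List Int) :=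
  let size : Int := matrix_a.length
  let result0 : List (List Int) := List.replicate size.toNat (List.replicate size.toNat 0)
  let ma : List (List Int) :=
    if transpose then
      (PySem.List.pyRange 0 size 1).map (fun i => (PySem.List.pyRange 0 size 1).map (fun j => pvIdxA matrix_a j i))
    else matrix_a
  let mb : List (List Int) :=
    if transpose then
      (PySem.List.pyRange 0 size 1).map (fun i => (PySem.List.pyRange 0 size 1).map (fun j => pvIdxA matrix_b j i))
    else matrix_b
  (PySem.List.pyRange 0 size 1).foldl (fun res i =>
    (PySem.List.pyRange 0 size 1).foldl (fun res j =>
      res.set i.toNat ((PySem.List.pyGetD res i []).set j.toNat (pvIdxA ma i j * pvIdxA mb i j))) res) result0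

-- ===== PORT B =====
-- Python m[i][j] in B (totalized with defaults; exact on in-range indices, which Pre_ guarantees)
def pvIdxB (m : List (List Int)) (i j : Int) : Int :=
  PySem.List.pyGetD (PySem.List.pyGetD m i []) j 0

def process_matrices_alt (matrix_a : List (List Int)) (matrix_b : List (List Int)) (transpose : Bool) : List (List Int) :=
  let n : Int := matrix_a.length
  let flat0 : List Int := List.replicate (n * n).toNat 0
  let flat : List Int :=
    (PySem.List.pyRange 0 (n * n) 1).foldl (fun fl k =>
      let i := PySem.Int.floordiv k n
      let j := PySem.Int.mod k n
      fl.set (if transpose then j * n + i else k).toNat (pvIdxB matrix_a i j * pvIdxB matrix_b i j)) flat0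
  (PySem.List.pyRange 0 n 1).map (fun r =>
    PySem.List.slice flat (some (r * n)) (some ((r + 1) * n)))

-- ===== PRECONDITION & SPEC =====
-- Pre_ = exactly the inputs on which A raises no IndexError: matrix_b has at least len(matrix_a)
-- rows, and each accessed row of either matrix has at least len(matrix_a) entries.
def Pre_process_matrices (matrix_a : List (List Int)) (matrix_b : List (List Int)) (transpose : Bool) : Prop :=
  matrix_a.length ≤ matrix_b.length ∧
  (∀ r ∈ matrix_a, matrix_a.length ≤ r.length) ∧
  (∀ r ∈ matrix_b.take matrix_a.length, matrix_a.length ≤ r.length)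
instance (matrix_a : List (List Int)) (matrix_b : List (List Int)) (transpose : Bool) : Decidable (Pre_process_matrices matrix_a matrix_b transpose) := by unfold Pre_process_matrices; infer_instance

def pvWitness_process_matrices : List (List Int) × List (List Int) × Bool :=
  ([[1, 2], [3, 4]], [[5, 6], [7, 8]], true)

def Spec_process_matrices (matrix_a : List (List Int)) (matrix_b : List (List Int)) (transpose : Bool) (out : List (List Int)) : Prop := out = process_matrices_alt matrix_a matrix_b transpose
instance (matrix_a : List (List Int)) (matrix_b : List (List Int)) (transpose : Bool) (out : List (List Int)) : Decidable (Spec_process_matrices matrix_a matrix_b transpose out) := by unfold Spec_process_matrices; infer_instance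

-- ===== CLAIM (what is proved, stated in full; the proofs are below) =====
def Claim_equal_process_matrices : Prop := ∀ (matrix_a : List (List Int)) (matrix_b : List (List Int)) (transpose : Bool), Dom_process_matrices matrix_a matrix_b transpose → Pre_process_matrices matrix_a matrix_b transpose → Spec_process_matrices matrix_a matrix_b transpose (process_matrices matrix_a matrix_b transpose)

-- ===== LEMMAS AND PROOFS =====

-- ---------- A-side: the two nested loops write the n×n table ----------

-- writing row i, position j of a matrix, one inner python loop: fills positions 0..k-1 of row i
lemma pv_inner_fold (i : Nat) (g : Nat → Int) :
    ∀ (k : Nat) (res : List (List Int)) (hi : i < res.length), k ≤ res[i].length →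
      (List.range k).foldl (fun r j => r.set i ((r.getD i []).set j (g j))) res
        = res.set i ((List.range k).map g ++ res[i].drop k) := by
  intro k
  induction k with
  | zero =>
      intro res hi _
      simp [List.set_getElem_self]
  | succ k ih =>
      intro res hi hk
      rw [List.range_succ, List.foldl_append, ih res hi (by omega)]
      simp only [List.foldl_cons, List.foldl_nil]
      have hiM : i < (res.set i ((List.range k).map g ++ res[i].drop k)).length := by
        simpa using hi
      have h1 : (res.set i ((List.range k).map g ++ res[i].drop k)).getD i []
          = (List.range k).map g ++ res[i].drop k := by
        rw [List.getD_eq_getElem _ _ hiM, List.getElem_set_self]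
      rw [h1, List.set_set]
      congr 1
      rw [List.set_append_right _ _ (by simp)]
      simp
      rw [List.drop_eq_getElem_cons (show k < res[i].length by omega), List.set_cons_zero]

-- the outer python loop: rows 0..k-1 replaced by the computed rows
lemma pv_outer_fold (g : Nat → Nat → Int) (n : Nat) :
    ∀ (k : Nat) (res : List (List Int)), k ≤ res.length → (∀ r ∈ res, r.length = n) →
      (List.range k).foldl (fun res i =>
          (List.range n).foldl (fun r j => r.set i ((r.getD i []).set j (g i j))) res) res
        = (List.range k).map (fun i => (List.range n).map (g i)) ++ res.drop k := by
  intro k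
  induction k with
  | zero => intro res _ _; simp
  | succ k ih =>
      intro res hk hlen
      rw [List.range_succ, List.foldl_append, ih res (by omega) hlen]
      set M := (List.range k).map (fun i => (List.range n).map (g i)) ++ res.drop k with hM
      have hkM : k < M.length := by
        simp [hM, List.length_append]; omega
      have hMk : M[k] = res[k] := by
        have : M[k]'hkM = (res.drop k)[0]'(by simp; omega) := by
          simp [hM]
        simpa [List.getElem_drop] using this
      have hlenMk : n ≤ M[k].length := by
        rw [hMk]; exact le_of_eq (hlen _ (List.getElem_mem _)).symm
      simp only [List.foldl_cons, List.foldl_nil]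
      rw [pv_inner_fold k (g k) n M hkM hlenMk]
      have hdropn : M[k].drop n = [] := by
        rw [hMk]
        exact List.drop_eq_nil_of_le (le_of_eq (hlen _ (List.getElem_mem _)))
      rw [hdropn, List.append_nil]
      have hdrop : res.drop k = res[k] :: res.drop (k + 1) :=
        List.drop_eq_getElem_cons (by omega)
      rw [hM, List.set_append_right _ _ (by simp)]
      simp
      rw [List.drop_eq_getElem_cons (show k < res.length by omega), List.set_cons_zero]

-- python range(size) with size = (n : Int)
lemma pv_pyRange_nat (n : Nat) :
    PySem.List.pyRange 0 (n : Int) 1 = (List.range n).map Int.ofNat := by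
  rw [PySem.List.pyRange_one]
  simp

lemma pvIdxA_cast (m : List (List Int)) (i j : Nat) :
    pvIdxA m (i : Int) (j : Int) = (m.getD i []).getD j 0 := by
  simp [pvIdxA]

lemma pvIdxB_cast (m : List (List Int)) (i j : Nat) :
    pvIdxB m (i : Int) (j : Int) = (m.getD i []).getD j 0 := by
  simp [pvIdxB]

lemma pv_getD_map_range {α : Type} (f : Nat → α) (n i : Nat) (h : i < n) (d : α) :
    ((List.range n).map f).getD i d = f i := by
  rw [List.getD_eq_getElem _ _ (by simpa using h)]
  simp

-- A's double loop over an n×n zero matrix writes exactly the n×n table of f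
lemma pv_A_eval (f : Nat → Nat → Int) (n : Nat) :
    (List.range n).foldl (fun res i =>
        (List.range n).foldl (fun r j => r.set i ((r.getD i []).set j (f i j))) res)
      (List.replicate n (List.replicate n 0))
      = (List.range n).map (fun i => (List.range n).map (f i)) := by
  rw [pv_outer_fold f n n _ (by simp) (by intro r hr; simp [List.eq_of_mem_replicate hr])]
  simp

-- the same, stated over the Int-valued index lists the port folds over
lemma pv_A_eval_int (F : Int → Int → Int) (n : Nat) :
    ((List.range n).map Int.ofNat).foldl (fun res i =>
        ((List.range n).map Int.ofNat).foldl (fun res j =>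
          res.set i.toNat ((PySem.List.pyGetD res i []).set j.toNat (F i j))) res)
      (List.replicate n (List.replicate n 0))
      = (List.range n).map (fun i => (List.range n).map (fun j => F (Int.ofNat i) (Int.ofNat j))) := by
  simp only [List.foldl_map, Int.ofNat_eq_natCast, Int.toNat_natCast, PySem.List.pyGetD_natCast]
  exact pv_A_eval (fun i j => F i j) n

-- an n×n comprehension over the Int-valued index lists, re-indexed by Nat
lemma pv_map2_int (F : Int → Int → Int) (n : Nat) :
    ((List.range n).map Int.ofNat).map (fun i =>
        ((List.range n).map Int.ofNat).map (fun j => F i j))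
      = (List.range n).map (fun i => (List.range n).map (fun j => F (Int.ofNat i) (Int.ofNat j))) := by
  simp [List.map_map, Function.comp_def]

-- A reduces to the canonical table of F t
lemma pv_A_canon (a b : List (List Int)) (t : Bool) :
    process_matrices a b t
      = (List.range a.length).map (fun i => (List.range a.length).map (fun j =>
          if t then (a.getD j []).getD i 0 * (b.getD j []).getD i 0
          else (a.getD i []).getD j 0 * (b.getD i []).getD j 0)) := by
  cases t with
  | false =>
      simp only [process_matrices, Bool.false_eq_true, if_false, Int.toNat_natCast]
      rw [pv_pyRange_nat, pv_A_eval_int]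
      simp only [Int.ofNat_eq_natCast, pvIdxA_cast]
  | true =>
      simp only [process_matrices, if_true, Int.toNat_natCast]
      rw [pv_pyRange_nat]
      simp only [pv_map2_int]
      rw [pv_A_eval_int]
      apply List.map_congr_left
      intro i hi
      have hi' : i < a.length := List.mem_range.mp hi
      apply List.map_congr_left
      intro j hj
      have hj' : j < a.length := List.mem_range.mp hj
      simp only [Int.ofNat_eq_natCast, pvIdxA_cast]
      rw [pv_getD_map_range _ _ _ hi', pv_getD_map_range _ _ _ hi',
        pv_getD_map_range _ _ _ hj', pv_getD_map_range _ _ _ hj']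

-- ---------- B-side: the scatter loop fills the flat buffer ----------

-- a fold of sets keeps the length
lemma pv_set_fold_length (σ : Nat → Nat) (f : Nat → Int) (ks : List Nat) (init : List Int) :
    (ks.foldl (fun fl k => fl.set (σ k) (f k)) init).length = init.length := by
  induction ks generalizing init with
  | nil => rfl
  | cons k ks ih => simp [List.foldl_cons, ih]

-- scatter characterization: writing f k at position σ k, with τ a left inverse of σ
lemma pv_scatter (σ τ : Nat → Nat) (f : Nat → Int) :
    ∀ (K : Nat) (init : List Int), (∀ k, k < K → τ (σ k) = k) →
      ∀ p, p < init.length →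
        ((List.range K).foldl (fun fl k => fl.set (σ k) (f k)) init).getD p 0
          = if τ p < K ∧ σ (τ p) = p then f (τ p) else init.getD p 0 := by
  intro K
  induction K with
  | zero => intro init _ p hp; simp
  | succ K ih =>
      intro init hστ p hp
      rw [List.range_succ, List.foldl_append]
      simp only [List.foldl_cons, List.foldl_nil]
      set M := (List.range K).foldl (fun fl k => fl.set (σ k) (f k)) init with hM
      have hMlen : M.length = init.length := pv_set_fold_length σ f _ init
      by_cases hpK : p = σ K
      · subst hpK
        have hτ : τ (σ K) = K := hστ K (by omega)
        rw [List.getD_eq_getElem _ _ (by rw [List.length_set, hMlen]; exact hp)]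
        rw [List.getElem_set_self (by simpa [hMlen] using hp)]
        rw [if_pos ⟨by omega, by rw [hτ]⟩]
        rw [hτ]
      · have hne : σ K ≠ p := fun h => hpK h.symm
        rw [List.getD_eq_getElem _ _ (by rw [List.length_set, hMlen]; exact hp)]
        rw [List.getElem_set_ne hne]
        rw [← List.getD_eq_getElem M 0 (by rw [hMlen]; exact hp)]
        rw [ih init (fun k hk => hστ k (by omega)) p hp]
        congr 1
        simp only [eq_iff_iff]
        constructor
        · rintro ⟨h1, h2⟩; exact ⟨by omega, h2⟩
        · rintro ⟨h1, h2⟩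
          refine ⟨?_, h2⟩
          by_cases h3 : τ p = K
          · exfalso; exact hpK (by rw [← h2, h3])
          · omega

-- the whole scatter over a replicate buffer is the table of f ∘ τ
lemma pv_scatter_eval (σ τ : Nat → Nat) (f : Nat → Int) (m : Nat)
    (hστ : ∀ k, k < m → τ (σ k) = k)
    (hτ : ∀ p, p < m → τ p < m ∧ σ (τ p) = p) :
    (List.range m).foldl (fun fl k => fl.set (σ k) (f k)) (List.replicate m 0)
      = (List.range m).map (fun p => f (τ p)) := by
  apply List.ext_getElem
  · rw [pv_set_fold_length]; simp
  · intro p h1 h2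
    have hp : p < m := by simpa using h2
    have := pv_scatter σ τ f m (List.replicate m 0) hστ p (by simpa using hp)
    rw [if_pos (hτ p hp)] at this
    rw [← List.getD_eq_getElem _ 0 h1, this]
    simp

-- arithmetic of the transposed flat index
lemma pv_idx_arith (n k : Nat) (hk : k < n * n) :
    (k % n) * n + k / n < n * n ∧
    ((k % n) * n + k / n) / n = k % n ∧ ((k % n) * n + k / n) % n = k / n := by
  have hn : 0 < n := by
    rcases Nat.eq_zero_or_pos n with h | h
    · subst h; omega
    · exact h
  have hdiv : k / n < n := Nat.div_lt_iff_lt_mul hn |>.mpr hk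
  have hmod : k % n < n := Nat.mod_lt _ hn
  refine ⟨?_, ?_, ?_⟩
  · calc (k % n) * n + k / n < (k % n) * n + n := by omega
      _ = (k % n + 1) * n := by ring
      _ ≤ n * n := Nat.mul_le_mul_right n (by omega)
  · rw [Nat.mul_comm (k % n) n, Nat.mul_add_div hn, Nat.div_eq_of_lt hdiv]
    omega
  · rw [Nat.mul_add_mod' (k % n) n (k / n), Nat.mod_eq_of_lt hdiv]

-- rows of the flat buffer: slice r*n .. r*n+n of the table of g
lemma pv_rows (g : Nat → Int) (n r : Nat) (hr : r < n) :
    (((List.range (n * n)).map g).drop (r * n)).take n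
      = (List.range n).map (fun j => g (r * n + j)) := by
  have hle : r * n + n ≤ n * n := by
    calc r * n + n = (r + 1) * n := by ring
      _ ≤ n * n := Nat.mul_le_mul_right n (by omega)
  apply List.ext_getElem
  · simp; omega
  · intro j h1 h2
    have hj : j < n := by simpa using h2
    rw [List.getElem_take, List.getElem_drop, List.getElem_map, List.getElem_range]
    simp

-- B reduces to the same canonical table
lemma pv_B_canon (a b : List (List Int)) (t : Bool) :
    process_matrices_alt a b t
      = (List.range a.length).map (fun i => (List.range a.length).map (fun j =>
          if t then (a.getD j []).getD i 0 * (b.getD j []).getD i 0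
          else (a.getD i []).getD j 0 * (b.getD i []).getD j 0)) := by
  set n := a.length with hn
  have hcast : ((n : Int) * (n : Int)) = ((n * n : Nat) : Int) := by push_cast; ring
  simp only [process_matrices_alt, ← hn, hcast, Int.toNat_natCast, pv_pyRange_nat]
  rw [List.foldl_map, List.map_map]
  -- rewrite the fold body over Nat counters
  have hbody : (fun (fl : List Int) (k : Nat) =>
        fl.set (if t then PySem.Int.mod (Int.ofNat k) n * n + PySem.Int.floordiv (Int.ofNat k) n
                else Int.ofNat k).toNat
          (pvIdxB a (PySem.Int.floordiv (Int.ofNat k) n) (PySem.Int.mod (Int.ofNat k) n) *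
           pvIdxB b (PySem.Int.floordiv (Int.ofNat k) n) (PySem.Int.mod (Int.ofNat k) n)))
      = (fun (fl : List Int) (k : Nat) =>
          fl.set (if t then (k % n) * n + k / n else k)
            ((a.getD (k / n) []).getD (k % n) 0 * (b.getD (k / n) []).getD (k % n) 0)) := by
    funext fl k
    have h1 : PySem.Int.floordiv (Int.ofNat k) n = ((k / n : Nat) : Int) := by
      exact_mod_cast PySem.Int.floordiv_natCast k n
    have h2 : PySem.Int.mod (Int.ofNat k) n = ((k % n : Nat) : Int) := by
      exact_mod_cast PySem.Int.mod_natCast k n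
    rw [h1, h2]
    have h3 : (((k % n : Nat) : Int) * n + ((k / n : Nat) : Int)) = (((k % n) * n + k / n : Nat) : Int) := by
      push_cast; ring
    cases t with
    | false =>
        simp only [Bool.false_eq_true, if_false, Int.ofNat_eq_natCast, Int.toNat_natCast,
          pvIdxB_cast]
    | true =>
        simp only [if_true, h3, Int.ofNat_eq_natCast, Int.toNat_natCast, pvIdxB_cast]
  rw [hbody]
  cases t with
  | false =>
      simp only [Bool.false_eq_true, if_false]
      have hs := pv_scatter_eval (fun k => k) (fun k => k)
        (fun k => (a.getD (k / n) []).getD (k % n) 0 * (b.getD (k / n) []).getD (k % n) 0)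
        (n * n) (fun _ _ => rfl) (fun p hp => ⟨hp, rfl⟩)
      simp only [hs]
      apply List.ext_getElem
      · simp
      · intro r h1 h2
        have hr : r < n := by simpa using h1
        simp only [List.getElem_map, List.getElem_range, Function.comp_apply, Int.ofNat_eq_natCast]
        have hrn : ((r : Int) + 1) * n = ((r * n : Nat) : Int) + ((n : Nat) : Int) := by
          push_cast; ring
        have hrn2 : ((r : Int)) * n = ((r * n : Nat) : Int) := by push_cast; ring
        rw [hrn2, hrn, PySem.List.slice_natCast_add]
        rw [pv_rows _ n r hr]
        apply List.map_congr_left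
        intro j hj
        have hj' : j < n := List.mem_range.mp hj
        have hdiv : (r * n + j) / n = r := by
          rw [Nat.mul_comm r n, Nat.mul_add_div (by omega), Nat.div_eq_of_lt hj']
          omega
        have hmod : (r * n + j) % n = j := by
          rw [Nat.mul_comm r n, Nat.mul_add_mod, Nat.mod_eq_of_lt hj']
        rw [hdiv, hmod]
  | true =>
      simp only [if_true]
      have hs := pv_scatter_eval (fun k => (k % n) * n + k / n) (fun k => (k % n) * n + k / n)
        (fun k => (a.getD (k / n) []).getD (k % n) 0 * (b.getD (k / n) []).getD (k % n) 0)
        (n * n)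
        (fun k hk => by
          obtain ⟨_, hd, hm⟩ := pv_idx_arith n k hk
          simp only [hd, hm]
          rw [Nat.mul_comm (k / n) n]
          exact Nat.div_add_mod k n)
        (fun p hp => by
          obtain ⟨hlt, hd, hm⟩ := pv_idx_arith n p hp
          refine ⟨hlt, ?_⟩
          simp only [hd, hm]
          rw [Nat.mul_comm (p / n) n]
          exact Nat.div_add_mod p n)
      simp only [hs]
      apply List.ext_getElem
      · simp
      · intro r h1 h2
        have hr : r < n := by simpa using h1
        simp only [List.getElem_map, List.getElem_range, Function.comp_apply, Int.ofNat_eq_natCast]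
        have hrn : ((r : Int) + 1) * n = ((r * n : Nat) : Int) + ((n : Nat) : Int) := by
          push_cast; ring
        have hrn2 : ((r : Int)) * n = ((r * n : Nat) : Int) := by push_cast; ring
        rw [hrn2, hrn, PySem.List.slice_natCast_add]
        rw [pv_rows _ n r hr]
        apply List.map_congr_left
        intro j hj
        have hj' : j < n := List.mem_range.mp hj
        have hdiv : (r * n + j) / n = r := by
          rw [Nat.mul_comm r n, Nat.mul_add_div (by omega), Nat.div_eq_of_lt hj']
          omega
        have hmod : (r * n + j) % n = j := by
          rw [Nat.mul_comm r n, Nat.mul_add_mod, Nat.mod_eq_of_lt hj']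
        rw [hdiv, hmod]
        have hd2 : (j * n + r) / n = j := by
          rw [Nat.mul_comm j n, Nat.mul_add_div (by omega), Nat.div_eq_of_lt hr]
          omega
        have hm2 : (j * n + r) % n = r := by
          rw [Nat.mul_comm j n, Nat.mul_add_mod, Nat.mod_eq_of_lt hr]
        rw [hd2, hm2]

-- ===== VERDICT (by name: the statement is the Claim_ definition above) =====
theorem process_matrices_spec : Claim_equal_process_matrices := by
  intro a b t _ _
  unfold Spec_process_matrices
  rw [pv_A_canon, pv_B_canon]
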